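-- pv_equiv track=rewrite | github.com/avxe/nts-feed | nts_feed/services/youtube_service.py | _normalize_lookup_value
-- ===== SOURCE A (Python) =====
-- def _normalize_lookup_value(value: str) -> str:
--     raw = (value or "").lower().strip()
--     if not raw:
--         return ""
--     raw = " ".join(raw.split())
--     allowed_punct = {" ", "&", "+", "/", ".", "-", "'", ",", ":", ";", "(", ")"}
--     out = []
--     for ch in raw:
--         if ch.isalnum() or ch in allowed_punct:
--             out.append(ch)
--     return " ".join("".join(out).split())
-- ===== SOURCE B (Python) =====
-- def _normalize_lookup_value(value: str) -> str:
--     out = []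
--     pending = False
--     for ch in (value or "").lower():
--         if ch.isspace():
--             pending = True
--         elif ch.isalnum() or ch in "&+/.-',:;()":
--             if pending and out:
--                 out.append(" ")
--             out.append(ch)
--             pending = False
--         # disallowed non-space characters are dropped without buffering a space
--     return "".join(out)
-- ===== Notes on version B (the rewrite author's own statement) =====
-- stated objective: alternative
-- what changed: Replaces A's multi-pass pipeline (strip, split/join collapse, filter, second split/join collapse) with a single state-carrying traversal of the lowered string that buffers a pending-space flag and emits at most one separating space before each kept character.
import Mathlib
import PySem

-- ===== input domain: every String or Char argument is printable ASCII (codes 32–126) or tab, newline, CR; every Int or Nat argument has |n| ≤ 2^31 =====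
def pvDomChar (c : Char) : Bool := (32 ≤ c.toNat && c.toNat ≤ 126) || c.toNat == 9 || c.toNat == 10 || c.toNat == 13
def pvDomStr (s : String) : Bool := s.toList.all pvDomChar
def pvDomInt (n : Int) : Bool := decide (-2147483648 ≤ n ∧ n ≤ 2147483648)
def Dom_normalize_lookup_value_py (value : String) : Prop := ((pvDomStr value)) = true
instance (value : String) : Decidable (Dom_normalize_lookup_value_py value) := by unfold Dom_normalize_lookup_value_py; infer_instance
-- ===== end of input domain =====

-- B replaces A's build-then-collapse-twice pipeline with one state-carrying pass (pending-space flag); objective: alternative decomposition, same O(n) cost.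

-- ===== PORT A =====
-- allowed_punct = {" ", "&", "+", "/", ".", "-", "'", ",", ":", ";", "(", ")"}
def pvAllowedPunctA : PySem.Set Char :=
  PySem.Set.ofList [' ', '&', '+', '/', '.', '-', '\'', ',', ':', ';', '(', ')']

-- ch.isalnum() or ch in allowed_punct
def pvKeepA (ch : Char) : Bool :=
  PySem.Chars.isalnum ch || PySem.Set.contains pvAllowedPunctA ch

def normalize_lookup_value_py (value : String) : String :=
  -- raw = (value or "").lower().strip()
  let raw := PySem.Chars.strip (PySem.Chars.lower (if value == "" then "" else value).toList)
  -- if not raw: return ""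
  if raw = [] then ""
  else
    -- raw = " ".join(raw.split())
    let raw2 := PySem.Chars.join [' '] (PySem.Chars.split₀ raw)
    -- out = []; for ch in raw: if ch.isalnum() or ch in allowed_punct: out.append(ch)
    let out := raw2.foldl (fun acc ch => if pvKeepA ch then acc ++ [ch] else acc) ([] : List Char)
    -- return " ".join("".join(out).split())
    String.ofList (PySem.Chars.join [' '] (PySem.Chars.split₀ out))

-- ===== PORT B =====
-- ch.isalnum() or ch in "&+/.-',:;()"
def pvKeepB (ch : Char) : Bool :=
  PySem.Chars.isalnum ch || ['&', '+', '/', '.', '-', '\'', ',', ':', ';', '(', ')'].contains ch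

-- one loop step of B: (out, pending) updated by one character
def pvStepB (st : List Char × Bool) (ch : Char) : List Char × Bool :=
  if PySem.Chars.isspace ch then (st.1, true)
  else if pvKeepB ch then
    ((if st.2 && !st.1.isEmpty then st.1 ++ [' '] else st.1) ++ [ch], false)
  else st

def normalize_lookup_value_py_alt (value : String) : String :=
  String.ofList ((PySem.Chars.lower value.toList).foldl pvStepB ([], false)).1

-- ===== PRECONDITION & SPEC =====
def Spec_normalize_lookup_value_py (value : String) (out : String) : Prop := out = normalize_lookup_value_py_alt value
instance (value : String) (out : String) : Decidable (Spec_normalize_lookup_value_py value out) := by unfold Spec_normalize_lookup_value_py; infer_instance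

-- ===== CLAIM (what is proved, stated in full; the proofs are below) =====
def Claim_equal_normalize_lookup_value_py : Prop := ∀ (value : String), Dom_normalize_lookup_value_py value → Spec_normalize_lookup_value_py value (normalize_lookup_value_py value)

-- ===== LEMMAS AND PROOFS =====

-- non-space test used by takeWhile/dropWhile decompositions
def pvNS (c : Char) : Bool := !PySem.Chars.isspace c

-- clean structural version of PySem.Chars.split₀.go (accumulator-free)
def pvSp : List Char → List Char → List (List Char)
  | [], cur => if cur.isEmpty then [] else [cur.reverse]
  | c :: r, cur =>
    if PySem.Chars.isspace c then
      (if cur.isEmpty then pvSp r [] else cur.reverse :: pvSp r [])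
    else pvSp r (c :: cur)

-- B's suffix semantics: output contributed by the rest of the string when
-- something has already been emitted (pend = buffered pending space)
def pvTail : Bool → List Char → List Char
  | _, [] => []
  | pend, c :: r =>
    if PySem.Chars.isspace c then pvTail true r
    else if pvKeepB c then (if pend then [' '] else []) ++ c :: pvTail false r
    else pvTail pend r

-- B's semantics from the empty output state
def pvHead : List Char → List Char
  | [] => []
  | c :: r =>
    if PySem.Chars.isspace c then pvHead r
    else if pvKeepB c then c :: pvTail false r
    else pvHead r

-- words, filtered by B's keep predicate, nonempty ones, each prefixed by ' '
def pvF (ws : List (List Char)) : List Char :=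
  (((ws.map (List.filter pvKeepB)).filter (fun w => !w.isEmpty)).flatMap (fun w => ' ' :: w))

theorem pv_go_eq (s : List Char) : ∀ cur acc, PySem.Chars.split₀.go s cur acc = acc.reverse ++ pvSp s cur := by
  induction s with
  | nil => intro cur acc; simp [PySem.Chars.split₀.go, pvSp]; split <;> simp
  | cons c r ih =>
    intro cur acc
    simp only [PySem.Chars.split₀.go, pvSp]
    by_cases hs : PySem.Chars.isspace c = true <;> by_cases hc : cur = [] <;>
      simp [hs, hc, ih]

theorem pv_split₀_eq (s : List Char) : PySem.Chars.split₀ s = pvSp s [] := by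
  simp [PySem.Chars.split₀, pv_go_eq]

-- accumulate a whitespace-free block into the current word
theorem pv_sp_acc (w : List Char) : ∀ rest cur, (∀ c ∈ w, PySem.Chars.isspace c = false) →
    pvSp (w ++ rest) cur = pvSp rest (w.reverse ++ cur) := by
  induction w with
  | nil => simp
  | cons c t ih =>
    intro rest cur h
    have hc : PySem.Chars.isspace c = false := h c (by simp)
    simp [pvSp, hc, ih rest (c :: cur) (fun x hx => h x (by simp [hx]))]

-- peel the first word off pvSp when the current word is nonempty
theorem pv_sp_word (r : List Char) : ∀ cur, cur ≠ [] →
    pvSp r cur = (cur.reverse ++ r.takeWhile pvNS) :: pvSp (r.dropWhile pvNS) [] := by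
  induction r with
  | nil => intro cur h; simp [pvSp, h, List.isEmpty_iff]
  | cons c t ih =>
    intro cur h
    by_cases hs : PySem.Chars.isspace c = true
    · simp [pvSp, hs, pvNS, h]
    · simp only [pvSp, hs, if_false, Bool.false_eq_true]
      rw [ih (c :: cur) (by simp)]
      simp [pvNS, hs]

-- trailing whitespace does not change the words
theorem pv_sp_trail (s : List Char) : ∀ t cur, (∀ c ∈ t, PySem.Chars.isspace c = true) →
    pvSp (s ++ t) cur = pvSp s cur := by
  induction s with
  | nil =>
    intro t
    induction t with
    | nil => simp
    | cons c u iht =>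
      intro cur h
      have hc := h c (by simp)
      have hu : ∀ x ∈ u, PySem.Chars.isspace x = true := fun x hx => h x (by simp [hx])
      have h0 := iht [] hu
      simp only [List.nil_append] at h0 ⊢
      by_cases hcur : cur = [] <;>
        simp [pvSp, hc, hcur, h0]
  | cons c u ih =>
    intro t cur h
    by_cases hs : PySem.Chars.isspace c = true <;>
      simp [pvSp, hs, ih _ _ h]

-- leading whitespace does not change the words
theorem pv_sp_lstrip (L : List Char) : pvSp (List.dropWhile PySem.Chars.isspace L) [] = pvSp L [] := by
  induction L with
  | nil => simp
  | cons c r ih =>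
    by_cases hs : PySem.Chars.isspace c = true <;>
      simp [List.dropWhile, hs, pvSp, ih]

theorem pv_sp_strip (L : List Char) : pvSp (PySem.Chars.strip L) [] = pvSp L [] := by
  have hdecomp : PySem.Chars.lstrip L =
      PySem.Chars.rstrip (PySem.Chars.lstrip L) ++ (List.takeWhile PySem.Chars.isspace (PySem.Chars.lstrip L).reverse).reverse := by
    calc PySem.Chars.lstrip L = (PySem.Chars.lstrip L).reverse.reverse := by simp
      _ = (List.takeWhile PySem.Chars.isspace (PySem.Chars.lstrip L).reverse ++
            List.dropWhile PySem.Chars.isspace (PySem.Chars.lstrip L).reverse).reverse := by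
          rw [List.takeWhile_append_dropWhile]
      _ = (List.dropWhile PySem.Chars.isspace (PySem.Chars.lstrip L).reverse).reverse ++
            (List.takeWhile PySem.Chars.isspace (PySem.Chars.lstrip L).reverse).reverse :=
          List.reverse_append
      _ = _ := rfl
  have hsp : ∀ c ∈ (List.takeWhile PySem.Chars.isspace (PySem.Chars.lstrip L).reverse).reverse,
      PySem.Chars.isspace c = true := by
    intro c hc
    exact List.mem_takeWhile_imp (by simpa using hc)
  have h1 : PySem.Chars.strip L = PySem.Chars.rstrip (PySem.Chars.lstrip L) := rfl
  rw [h1, ← pv_sp_trail _ _ [] hsp, ← hdecomp]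
  simpa [PySem.Chars.lstrip] using pv_sp_lstrip L

-- every word is nonempty and whitespace-free
theorem pv_sp_words (L : List Char) : ∀ cur, (∀ c ∈ cur, PySem.Chars.isspace c = false) →
    ∀ w ∈ pvSp L cur, w ≠ [] ∧ ∀ c ∈ w, PySem.Chars.isspace c = false := by
  induction L with
  | nil =>
    intro cur hcur w hw
    simp only [pvSp] at hw
    by_cases hc : cur.isEmpty <;> simp [hc] at hw
    subst hw
    constructor
    · simpa [List.isEmpty_iff] using hc
    · intro c hc'; exact hcur c (by simpa using hc')
  | cons c r ih =>
    intro cur hcur w hw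
    by_cases hs : PySem.Chars.isspace c = true
    · simp only [pvSp, hs, if_true] at hw
      by_cases hc : cur.isEmpty
      · simp [hc] at hw; exact ih [] (by simp) w hw
      · simp [hc] at hw
        rcases hw with hw | hw
        · subst hw
          refine ⟨by simpa [List.isEmpty_iff] using hc, ?_⟩
          intro x hx; exact hcur x (by simpa using hx)
        · exact ih [] (by simp) w hw
    · simp only [pvSp, hs, if_false, Bool.false_eq_true] at hw
      refine ih (c :: cur) ?_ w hw
      intro x hx
      rcases List.mem_cons.mp hx with h | h
      · subst h; simpa using hs
      · exact hcur x h

-- A's keep and B's keep agree off whitespace, and A keeps the space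
theorem pv_keepA_space : pvKeepA ' ' = true := by decide

theorem pv_keep_agree (c : Char) (h : PySem.Chars.isspace c = false) : pvKeepA c = pvKeepB c := by
  have hne : c ≠ ' ' := by rintro rfl; exact absurd h (by decide)
  simp [pvKeepA, pvKeepB, pvAllowedPunctA, PySem.Set.contains, PySem.Set.ofList, PySem.Set.add, hne]

-- filtering A's way through the single-space-joined words filters each word B's way
theorem pv_filter_join (ws : List (List Char))
    (h : ∀ w ∈ ws, ∀ c ∈ w, PySem.Chars.isspace c = false) :
    List.filter pvKeepA (PySem.Chars.join [' '] ws) =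
      PySem.Chars.join [' '] (ws.map (List.filter pvKeepB)) := by
  induction ws with
  | nil => simp [PySem.Chars.join, List.intercalate]
  | cons w rest ih =>
    have hw : List.filter pvKeepA w = List.filter pvKeepB w := by
      apply List.filter_congr
      intro c hc
      exact pv_keep_agree c (h w (by simp) c hc)
    cases rest with
    | nil => simpa [PySem.Chars.join_singleton] using hw
    | cons w2 rest2 =>
      rw [PySem.Chars.join_cons_cons, List.filter_append, List.filter_append, hw,
        ih (fun x hx c hc => h x (by simp at hx ⊢; tauto) c hc)]
      simp [List.map_cons, PySem.Chars.join_cons_cons, pv_keepA_space]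

-- splitting the single-space join of whitespace-free pieces keeps the nonempty pieces
theorem pv_sp_join (ws : List (List Char))
    (h : ∀ w ∈ ws, ∀ c ∈ w, PySem.Chars.isspace c = false) :
    pvSp (PySem.Chars.join [' '] ws) [] = ws.filter (fun w => !w.isEmpty) := by
  induction ws with
  | nil => simp [PySem.Chars.join, List.intercalate, pvSp]
  | cons w rest ih =>
    have hw : ∀ c ∈ w, PySem.Chars.isspace c = false := h w (by simp)
    cases rest with
    | nil =>
      rw [PySem.Chars.join_singleton]
      have hacc := pv_sp_acc w [] [] hw
      simp only [List.append_nil] at hacc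
      rw [hacc]
      by_cases hempty : w = [] <;> simp [pvSp, hempty]
    | cons w2 rest2 =>
      rw [PySem.Chars.join_cons_cons, List.append_assoc]
      have hacc := pv_sp_acc w ([' '] ++ PySem.Chars.join [' '] (w2 :: rest2)) [] hw
      rw [hacc]
      have hih := ih (fun x hx c hc => h x (by simp at hx ⊢; tauto) c hc)
      by_cases hempty : w = [] <;>
        simp [pvSp, (by decide : PySem.Chars.isspace ' ' = true), hempty, hih]

-- B's tail from a word boundary
theorem pv_tail_false (L : List Char) :
    pvTail false L = List.filter pvKeepB (L.takeWhile pvNS) ++ pvTail true (L.dropWhile pvNS) := by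
  induction L with
  | nil => simp [pvTail]
  | cons c r ih =>
    by_cases hs : PySem.Chars.isspace c = true
    · simp [pvTail, hs, List.takeWhile, List.dropWhile, pvNS]
    · by_cases hk : pvKeepB c = true <;>
        simp [pvTail, hs, hk, List.takeWhile, List.dropWhile, pvNS, ih]

theorem pv_tail_true (L : List Char) :
    pvTail true L = (if (List.filter pvKeepB (L.takeWhile pvNS)).isEmpty then []
        else ' ' :: List.filter pvKeepB (L.takeWhile pvNS)) ++ pvTail true (L.dropWhile pvNS) := by
  induction L with
  | nil => simp [pvTail]
  | cons c r ih =>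
    by_cases hs : PySem.Chars.isspace c = true
    · simp [List.takeWhile, List.dropWhile, pvNS, hs]
    · by_cases hk : pvKeepB c = true
      · simp [pvTail, hs, hk, List.takeWhile, List.dropWhile, pvNS, pv_tail_false r]
      · simp [pvTail, hs, hk, List.takeWhile, List.dropWhile, pvNS, ih]

theorem pvF_cons (w : List Char) (ws : List (List Char)) :
    pvF (w :: ws) = (if (List.filter pvKeepB w).isEmpty then []
      else ' ' :: List.filter pvKeepB w) ++ pvF ws := by
  by_cases hw : (List.filter pvKeepB w).isEmpty <;> simp [pvF, hw]

theorem pv_tail_eq_F_aux (n : Nat) : ∀ L : List Char, L.length ≤ n → pvTail true L = pvF (pvSp L []) := by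
  induction n with
  | zero =>
    intro L h
    have : L = [] := by cases L <;> simp_all
    subst this
    simp [pvTail, pvSp, pvF]
  | succ n ih =>
    intro L h
    cases L with
    | nil => simp [pvTail, pvSp, pvF]
    | cons c r =>
      have hr : r.length ≤ n := by simpa using h
      have hdrop : (r.dropWhile pvNS).length ≤ n :=
        le_trans (List.length_dropWhile_le pvNS r) hr
      by_cases hs : PySem.Chars.isspace c = true
      · simp only [pvTail, hs, if_true, pvSp, List.isEmpty_nil]
        exact ih r hr
      · by_cases hk : pvKeepB c = true
        · have hsp : pvSp (c :: r) [] = (c :: r.takeWhile pvNS) :: pvSp (r.dropWhile pvNS) [] := by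
            have := pv_sp_word r [c] (by simp)
            simp only [pvSp, hs, if_false, Bool.false_eq_true] at this ⊢
            simpa using this
          rw [hsp, pvF_cons]
          have hfil : List.filter pvKeepB (c :: r.takeWhile pvNS) =
              c :: List.filter pvKeepB (r.takeWhile pvNS) := by simp [hk]
          rw [hfil]
          simp only [List.isEmpty_cons, Bool.false_eq_true, if_false]
          rw [← ih (r.dropWhile pvNS) hdrop]
          simp [pvTail, hs, hk, pv_tail_false r]
        · have hsp : pvSp (c :: r) [] = (c :: r.takeWhile pvNS) :: pvSp (r.dropWhile pvNS) [] := by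
            have := pv_sp_word r [c] (by simp)
            simp only [pvSp, hs, if_false, Bool.false_eq_true] at this ⊢
            simpa using this
          rw [hsp, pvF_cons]
          have hfil : List.filter pvKeepB (c :: r.takeWhile pvNS) =
              List.filter pvKeepB (r.takeWhile pvNS) := by simp [hk]
          rw [hfil, ← ih (r.dropWhile pvNS) hdrop]
          have hL : pvTail true (c :: r) = pvTail true r := by simp [pvTail, hs, hk]
          rw [hL, pv_tail_true r]

theorem pv_tail_eq_F (L : List Char) : pvTail true L = pvF (pvSp L []) :=
  pv_tail_eq_F_aux L.length L le_rfl

theorem pv_head_eq_drop (L : List Char) : pvHead L = (pvTail true L).drop 1 := by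
  induction L with
  | nil => simp [pvHead, pvTail]
  | cons c r ih =>
    by_cases hs : PySem.Chars.isspace c = true
    · simp [pvHead, pvTail, hs, ih]
    · by_cases hk : pvKeepB c = true <;> simp [pvHead, pvTail, hs, hk, ih]

-- join is the flatMap with the first separator dropped
theorem pv_flatMap_join (vs : List (List Char)) :
    vs.flatMap (fun w => ' ' :: w) = if vs.isEmpty then [] else ' ' :: PySem.Chars.join [' '] vs := by
  induction vs with
  | nil => simp
  | cons v rest ih =>
    cases rest with
    | nil => simp [PySem.Chars.join_singleton]
    | cons v2 rest2 =>
      rw [PySem.Chars.join_cons_cons]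
      simp only [List.flatMap_cons, ih]
      simp

-- B's fold once something was emitted
theorem pv_fold_ne (L : List Char) : ∀ out pend, out ≠ [] →
    (L.foldl pvStepB (out, pend)).1 = out ++ pvTail pend L := by
  induction L with
  | nil => simp [pvTail]
  | cons c r ih =>
    intro out pend hout
    by_cases hs : PySem.Chars.isspace c = true
    · simp [pvStepB, hs, pvTail, ih _ _ hout]
    · by_cases hk : pvKeepB c = true
      · have hne : (if pend && !out.isEmpty then out ++ [' '] else out) ++ [c] ≠ [] := by simp
        simp only [List.foldl_cons, pvStepB, hs, if_false, hk, if_true, Bool.false_eq_true]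
        rw [ih _ _ hne]
        cases pend <;> simp [pvTail, hs, hk, hout]
      · simp [pvStepB, hs, hk, pvTail, ih _ _ hout]

-- B's fold from the empty output
theorem pv_fold_nil (L : List Char) : ∀ pend, (L.foldl pvStepB ([], pend)).1 = pvHead L := by
  induction L with
  | nil => simp [pvHead]
  | cons c r ih =>
    intro pend
    by_cases hs : PySem.Chars.isspace c = true
    · simp [pvStepB, hs, pvHead, ih]
    · by_cases hk : pvKeepB c = true
      · simp only [List.foldl_cons, pvStepB, hs, if_false, hk, if_true, Bool.false_eq_true]
        have : (if pend && !(([] : List Char)).isEmpty then ([] : List Char) ++ [' '] else []) ++ [c] = [c] := by simp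
        rw [this, pv_fold_ne r [c] false (by simp)]
        simp [pvHead, hs, hk]
      · simp [pvStepB, hs, hk, pvHead, ih]

theorem pv_strip_nil_all_space (L : List Char) (h : PySem.Chars.strip L = []) :
    ∀ c ∈ L, PySem.Chars.isspace c = true := by
  have hls : ∀ c ∈ PySem.Chars.lstrip L, PySem.Chars.isspace c = true := by
    have hdw : List.dropWhile PySem.Chars.isspace (PySem.Chars.lstrip L).reverse = [] := by
      have : (List.dropWhile PySem.Chars.isspace (PySem.Chars.lstrip L).reverse).reverse = [] := h
      simpa using this
    intro c hc
    exact List.dropWhile_eq_nil_iff.mp hdw c (by simpa using hc)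
  intro c hc
  rw [← List.takeWhile_append_dropWhile (p := PySem.Chars.isspace) (l := L)] at hc
  rcases List.mem_append.mp hc with h1 | h1
  · exact List.mem_takeWhile_imp h1
  · exact hls c h1

theorem pv_head_all_space (L : List Char) (h : ∀ c ∈ L, PySem.Chars.isspace c = true) :
    pvHead L = [] := by
  induction L with
  | nil => simp [pvHead]
  | cons c r ih =>
    simp [pvHead, h c (by simp), ih (fun x hx => h x (by simp [hx]))]

-- the common normal form: both programs compute pvHead of the lowered character list
theorem pv_A_eq_head (L : List Char) :
    PySem.Chars.join [' ']
      (PySem.Chars.split₀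
        ((PySem.Chars.join [' '] (PySem.Chars.split₀ (PySem.Chars.strip L))).foldl
          (fun acc ch => if pvKeepA ch then acc ++ [ch] else acc) ([] : List Char))) = pvHead L := by
  have hws := pv_sp_words L [] (by simp)
  have hsp : PySem.Chars.split₀ (PySem.Chars.strip L) = pvSp L [] := by
    rw [pv_split₀_eq, pv_sp_strip]
  rw [hsp, PySem.List.foldl_append_if_eq_filter, List.nil_append,
    pv_filter_join (pvSp L []) (fun w hw => (hws w hw).2),
    pv_split₀_eq,
    pv_sp_join ((pvSp L []).map (List.filter pvKeepB))
      (by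
        intro w hw c hc
        rcases List.mem_map.mp hw with ⟨w0, hw0, rfl⟩
        exact (hws w0 hw0).2 c (List.mem_of_mem_filter hc)),
    pv_head_eq_drop, pv_tail_eq_F]
  have hflat := pv_flatMap_join (((pvSp L []).map (List.filter pvKeepB)).filter (fun w => !w.isEmpty))
  by_cases hemp : (((pvSp L []).map (List.filter pvKeepB)).filter (fun w => !w.isEmpty)).isEmpty
  · rw [pvF, hflat]
    simp only [hemp, if_true]
    have : (((pvSp L []).map (List.filter pvKeepB)).filter (fun w => !w.isEmpty)) = [] :=
      List.isEmpty_iff.mp hemp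
    simp [this, PySem.Chars.join, List.intercalate]
  · rw [pvF, hflat]
    simp [hemp]

-- ===== VERDICTERDICT (by name: the statement is the Claim_ definition above) =====
theorem normalize_lookup_value_py_spec : Claim_equal_normalize_lookup_value_py := by
  intro value _
  show normalize_lookup_value_py value = normalize_lookup_value_py_alt value
  have harg : (if value == "" then "" else value) = value := by
    by_cases h : value = "" <;> simp [h]
  rw [normalize_lookup_value_py, normalize_lookup_value_py_alt, harg]
  rw [pv_fold_nil]
  by_cases hraw : PySem.Chars.strip (PySem.Chars.lower value.toList) = []
  · rw [if_pos hraw]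
    rw [pv_head_all_space _ (pv_strip_nil_all_space _ hraw)]
  · rw [if_neg hraw]
    simp only [pv_A_eq_head]
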